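-- pv_equiv track=rewrite | github.com/pabsdsr/urology_agent | server/app/services/call_schedule_import.py | _find_pod_column
-- ===== SOURCE A (Python) =====
-- from typing import Any, Dict, Iterable, List, Tuple
--
-- def _normalize_pod(pod_raw: Any) -> str | None:
--     if pod_raw is None:
--         return None
--     s = str(pod_raw).strip()
--     if not s:
--         return None
--     s_norm = " ".join(s.lower().split())
--     if s_norm in ("north pod", "north pod.", "north"):
--         return "North Pod"
--     if s_norm in ("central pod", "central pod.", "central"):
--         return "Central Pod"
--     if s_norm in ("south pod", "south pod.", "south"):
--         return "South Pod"
--     return None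
--
-- def _find_pod_column(rows: List[List[Any]], header_row_idx: int) -> int:
--     """Return leftmost column index that contains pod names (North/Central/South Pod) in data rows."""
--     data_rows = rows[header_row_idx + 1 :]
--     if not data_rows:
--         raise ValueError("No data rows found below the header")
--     max_col = max(len(row) for row in data_rows)
--     for col in range(max_col):
--         for row in data_rows[:20]:
--             if col < len(row) and _normalize_pod(row[col]) is not None:
--                 return col
--     raise ValueError(
--         "No pod column found"
--     )
-- ===== SOURCE B (Python) =====
-- def _normalize_pod(pod_raw):
--     if pod_raw is None:
--         return None
--     s = str(pod_raw).strip()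
--     if not s:
--         return None
--     s_norm = " ".join(s.lower().split())
--     if s_norm in ("north pod", "north pod.", "north"):
--         return "North Pod"
--     if s_norm in ("central pod", "central pod.", "central"):
--         return "Central Pod"
--     if s_norm in ("south pod", "south pod.", "south"):
--         return "South Pod"
--     return None
--
-- def _first_pod_col(row):
--     for col, cell in enumerate(row):
--         if _normalize_pod(cell) is not None:
--             return col
--     return None
--
-- def _find_pod_column(rows, header_row_idx):
--     """Row-by-row scan keeping the minimum matching column (no column-major pass, no max_col)."""
--     data_rows = rows[header_row_idx + 1:]
--     if not data_rows:
--         raise ValueError("No data rows found below the header")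
--     best = None
--     for row in data_rows[:20]:
--         c = _first_pod_col(row)
--         if c is not None and (best is None or c < best):
--             best = c
--     if best is None:
--         raise ValueError("No pod column found")
--     return best
-- ===== Notes on version B (the rewrite author's own statement) =====
-- stated objective: alternative
-- what changed: Replaces A's column-major scan (computing max_col and, for each column index, rescanning the first 20 data rows) by a single row-major pass that takes each row's first matching cell index and keeps the running minimum; the max_col computation disappears.
import Mathlib
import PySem

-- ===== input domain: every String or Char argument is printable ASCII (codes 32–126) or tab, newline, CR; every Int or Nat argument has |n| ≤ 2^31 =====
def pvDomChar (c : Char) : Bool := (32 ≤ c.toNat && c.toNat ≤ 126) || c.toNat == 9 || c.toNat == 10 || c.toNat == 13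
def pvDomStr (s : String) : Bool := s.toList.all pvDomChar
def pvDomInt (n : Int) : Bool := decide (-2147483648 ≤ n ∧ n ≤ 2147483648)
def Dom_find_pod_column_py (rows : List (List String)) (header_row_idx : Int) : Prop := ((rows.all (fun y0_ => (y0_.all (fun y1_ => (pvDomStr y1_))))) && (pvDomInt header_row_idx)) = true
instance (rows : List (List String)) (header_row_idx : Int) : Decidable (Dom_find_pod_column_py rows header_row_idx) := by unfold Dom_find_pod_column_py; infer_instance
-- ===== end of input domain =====

-- B changes the decomposition: a single row-major pass keeping the minimum matching column,
-- instead of A's column-major scan up to max_col; same values wherever A returns (Pre_).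

-- ===== PORT A =====
-- shared helper: port of _normalize_pod (cells are String, so the None branch never fires)
def normalizePod (pod_raw : String) : Option String :=
  let s := PySem.Str.strip pod_raw
  if s = "" then none
  else
    let s_norm := PySem.Str.join " " (PySem.Str.split₀ (PySem.Str.lower s))
    if s_norm = "north pod" ∨ s_norm = "north pod." ∨ s_norm = "north" then some "North Pod"
    else if s_norm = "central pod" ∨ s_norm = "central pod." ∨ s_norm = "central" then some "Central Pod"
    else if s_norm = "south pod" ∨ s_norm = "south pod." ∨ s_norm = "south" then some "South Pod"
    else none

-- port of A: column-major scan; -1 stands in for the two ValueError exits (excluded by Pre_)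
def find_pod_column_py (rows : List (List String)) (header_row_idx : Int) : Int :=
  let data_rows := PySem.List.slice rows (some (header_row_idx + 1)) none
  if data_rows = [] then -1
  else
    let max_col := (PySem.List.max? (data_rows.map (fun row => (row.length : Int))) (fun x => x)).getD 0
    match (PySem.List.pyRange 0 max_col 1).find? (fun col =>
        (data_rows.take 20).any (fun row =>
          decide (col < (row.length : Int)) && (normalizePod (PySem.List.pyGetD row col "")).isSome)) with
    | some col => col
    | none => -1

-- ===== PORT B =====
-- port of _first_pod_col: the enumerate loop, index carried as an accumulator
def firstPodCol : List String → Nat → Option Nat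
  | [], _ => none
  | cell :: rest, col => if (normalizePod cell).isSome then some col else firstPodCol rest (col + 1)

-- port of B: one pass over the first 20 data rows, tracking the minimum matching column
def find_pod_column_py_alt (rows : List (List String)) (header_row_idx : Int) : Int :=
  let data_rows := PySem.List.slice rows (some (header_row_idx + 1)) none
  if data_rows = [] then -1
  else
    let best := (data_rows.take 20).foldl
      (fun best row =>
        match firstPodCol row 0 with
        | none => best
        | some c =>
          match best with
          | none => some c
          | some b => if c < b then some c else best) (none : Option Nat)
    match best with
    | some b => (b : Int)
    | none => -1

-- ===== PRECONDITION & SPEC =====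
-- Pre_ excludes exactly the inputs where A raises ValueError (no data rows below the header,
-- or no pod cell in the first 20 data rows); B raises the same ValueError there.
def Pre_find_pod_column_py (rows : List (List String)) (header_row_idx : Int) : Prop :=
  let data_rows := PySem.List.slice rows (some (header_row_idx + 1)) none
  data_rows ≠ [] ∧
    (data_rows.take 20).any (fun row => row.any (fun c => (normalizePod c).isSome)) = true

instance (rows : List (List String)) (header_row_idx : Int) : Decidable (Pre_find_pod_column_py rows header_row_idx) := by
  unfold Pre_find_pod_column_py; infer_instance

def pvWitness_find_pod_column_py : List (List String) × Int := ([["x", "y"], ["", "North Pod"]], 0)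

def Spec_find_pod_column_py (rows : List (List String)) (header_row_idx : Int) (out : Int) : Prop := out = find_pod_column_py_alt rows header_row_idx
instance (rows : List (List String)) (header_row_idx : Int) (out : Int) : Decidable (Spec_find_pod_column_py rows header_row_idx out) := by unfold Spec_find_pod_column_py; infer_instance

-- ===== CLAIM (what is proved, stated in full; the proofs are below) =====
def Claim_equal_find_pod_column_py : Prop := ∀ (rows : List (List String)) (header_row_idx : Int), Dom_find_pod_column_py rows header_row_idx → Pre_find_pod_column_py rows header_row_idx → Spec_find_pod_column_py rows header_row_idx (find_pod_column_py rows header_row_idx)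

-- ===== LEMMAS AND PROOFS =====

-- the cell predicate both programs test
def isPodS (c : String) : Bool := (normalizePod c).isSome

-- B's inner loop is findIdx? (shifted by the start index)
theorem firstPodCol_eq_findIdx? (row : List String) (i : Nat) :
    firstPodCol row i = (List.findIdx? isPodS row).map (· + i) := by
  induction row generalizing i with
  | nil => simp [firstPodCol]
  | cons c rest ih =>
    by_cases h : (normalizePod c).isSome
    · simp [firstPodCol, h, List.findIdx?_cons, isPodS]
    · simp only [firstPodCol, h, ih, List.findIdx?_cons, isPodS, Bool.not_eq_true] at *
      simp [Option.map_map]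
      congr 1; funext x; omega

-- first element of range n satisfying P is P-true and minimal
theorem find?_range_spec (P : Nat → Bool) (n b : Nat)
    (h : (List.range n).find? P = some b) :
    P b = true ∧ ∀ k, k < b → P k = false := by
  induction n with
  | zero => simp at h
  | succ n ih =>
    rw [List.range_succ, List.find?_append] at h
    cases hfn : (List.range n).find? P with
    | some b' => rw [hfn] at h; simp at h; subst h; exact ih hfn
    | none =>
      rw [hfn] at h
      simp only [Option.none_or, List.find?_cons, List.find?_nil] at h
      split at h
      · cases h
        refine ⟨by assumption, fun k hk => ?_⟩
        have := List.find?_eq_none.mp hfn k (by simp [List.mem_range]; omega)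
        simpa using this
      · cases h

-- a matching column yields a findIdx? result at or below it
theorem findIdx?_le_of_hit (row : List String) (k : Nat)
    (hk : k < row.length) (hp : isPodS (row.getD k "") = true) :
    ∃ i, List.findIdx? isPodS row = some i ∧ i ≤ k := by
  cases hfi : List.findIdx? isPodS row with
  | some i =>
    obtain ⟨hlen, hpi, hmin⟩ := List.findIdx?_eq_some_iff_getElem.mp hfi
    refine ⟨i, rfl, ?_⟩
    by_contra hlt
    exact hmin k (by omega) (by rwa [List.getD_eq_getElem _ _ hk] at hp)
  | none =>
    have hmem : row.getD k "" ∈ row := by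
      rw [List.getD_eq_getElem _ _ hk]; exact List.getElem_mem hk
    have := List.findIdx?_eq_none_iff.mp hfi (row.getD k "") hmem
    rw [this] at hp; cases hp

-- column-hit predicate (A's inner test, in Nat form)
def colHit (t : List (List String)) (k : Nat) : Bool :=
  t.any (fun row => decide (k < row.length) && isPodS (row.getD k ""))

-- elements of the per-row first-index list are hit columns
theorem colHit_of_mem_filterMap (t : List (List String)) (i : Nat)
    (hi : i ∈ t.filterMap (fun row => List.findIdx? isPodS row)) :
    colHit t i = true := by
  obtain ⟨row, hrow, hfi⟩ := List.mem_filterMap.mp hi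
  obtain ⟨hlen, hpi, -⟩ := List.findIdx?_eq_some_iff_getElem.mp hfi
  refine List.any_eq_true.mpr ⟨row, hrow, ?_⟩
  simp only [Bool.and_eq_true, decide_eq_true_eq]
  exact ⟨hlen, by rwa [List.getD_eq_getElem _ _ hlen]⟩

-- a hit column dominates some element of the per-row first-index list
theorem mem_filterMap_le_of_colHit (t : List (List String)) (k : Nat)
    (hk : colHit t k = true) :
    ∃ i ∈ t.filterMap (fun row => List.findIdx? isPodS row), i ≤ k := by
  obtain ⟨row, hrow, hb⟩ := List.any_eq_true.mp hk
  simp only [Bool.and_eq_true, decide_eq_true_eq] at hb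
  obtain ⟨i, hfi, hle⟩ := findIdx?_le_of_hit row k hb.1 hb.2
  exact ⟨i, List.mem_filterMap.mpr ⟨row, hrow, hfi⟩, hle⟩

-- B's fold computes the minimum of the per-row first indices
theorem foldB_spec (t : List (List String)) (acc : Option Nat) :
    ∀ m, t.foldl
      (fun best row =>
        match firstPodCol row 0 with
        | none => best
        | some c =>
          match best with
          | none => some c
          | some b => if c < b then some c else best) acc = some m →
      ((m ∈ t.filterMap (fun row => List.findIdx? isPodS row) ∨ acc = some m) ∧
       (∀ j ∈ t.filterMap (fun row => List.findIdx? isPodS row), m ≤ j) ∧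
       (∀ a, acc = some a → m ≤ a)) := by
  induction t generalizing acc with
  | nil => intro m h; simp_all
  | cons row rest ih =>
    intro m h
    rw [List.foldl_cons] at h
    have hrw : firstPodCol row 0 = List.findIdx? isPodS row := by
      rw [firstPodCol_eq_findIdx?]; simp
    cases hfi : List.findIdx? isPodS row with
    | none =>
      rw [hrw, hfi] at h
      obtain ⟨h1, h2, h3⟩ := ih acc m h
      refine ⟨?_, ?_, h3⟩
      · rcases h1 with h1 | h1
        · refine Or.inl ?_
          obtain ⟨r, hr, hfr⟩ := List.mem_filterMap.mp h1
          exact List.mem_filterMap.mpr ⟨r, List.mem_cons_of_mem _ hr, hfr⟩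
        · exact Or.inr h1
      · intro j hj
        obtain ⟨r, hr, hfr⟩ := List.mem_filterMap.mp hj
        rcases List.mem_cons.mp hr with hr | hr
        · subst hr; rw [hfi] at hfr; cases hfr
        · exact h2 j (List.mem_filterMap.mpr ⟨r, hr, hfr⟩)
    | some c =>
      rw [hrw, hfi] at h
      have memc : c ∈ List.filterMap (fun row => List.findIdx? isPodS row) (row :: rest) :=
        List.mem_filterMap.mpr ⟨row, List.mem_cons_self, hfi⟩
      have memlift : ∀ x : Nat, x ∈ List.filterMap (fun row => List.findIdx? isPodS row) rest →
          x ∈ List.filterMap (fun row => List.findIdx? isPodS row) (row :: rest) := by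
        intro x hx
        obtain ⟨r, hr, hfr⟩ := List.mem_filterMap.mp hx
        exact List.mem_filterMap.mpr ⟨r, List.mem_cons_of_mem _ hr, hfr⟩
      have memdown : ∀ j : Nat, j ∈ List.filterMap (fun row => List.findIdx? isPodS row) (row :: rest) →
          j = c ∨ j ∈ List.filterMap (fun row => List.findIdx? isPodS row) rest := by
        intro j hj
        obtain ⟨r, hr, hfr⟩ := List.mem_filterMap.mp hj
        rcases List.mem_cons.mp hr with hr | hr
        · subst hr; rw [hfi] at hfr; exact Or.inl (by cases hfr; rfl)
        · exact Or.inr (List.mem_filterMap.mpr ⟨r, hr, hfr⟩)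
      cases acc with
      | none =>
        obtain ⟨h1, h2, h3⟩ := ih (some c) m h
        have hmc : m ≤ c := h3 c rfl
        refine ⟨?_, ?_, by intro a ha; cases ha⟩
        · rcases h1 with h1 | h1
          · exact Or.inl (memlift m h1)
          · exact Or.inl (by cases h1; exact memc)
        · intro j hj
          rcases memdown j hj with hj | hj
          · omega
          · exact h2 j hj
      | some b =>
        dsimp only [] at h
        by_cases hcb : c < b
        · rw [if_pos hcb] at h
          obtain ⟨h1, h2, h3⟩ := ih (some c) m h
          have hmc : m ≤ c := h3 c rfl
          refine ⟨?_, ?_, ?_⟩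
          · rcases h1 with h1 | h1
            · exact Or.inl (memlift m h1)
            · exact Or.inl (by cases h1; exact memc)
          · intro j hj
            rcases memdown j hj with hj | hj
            · omega
            · exact h2 j hj
          · intro a ha; cases ha; omega
        · rw [if_neg hcb] at h
          obtain ⟨h1, h2, h3⟩ := ih (some b) m h
          have hmb : m ≤ b := h3 b rfl
          refine ⟨?_, ?_, ?_⟩
          · rcases h1 with h1 | h1
            · exact Or.inl (memlift m h1)
            · exact Or.inr h1
          · intro j hj
            rcases memdown j hj with hj | hj
            · omega
            · exact h2 j hj
          · intro a ha; cases ha; exact hmb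

-- B's fold returns none only when no row has a pod cell
theorem foldB_none (t : List (List String)) (acc : Option Nat)
    (h : t.foldl
      (fun best row =>
        match firstPodCol row 0 with
        | none => best
        | some c =>
          match best with
          | none => some c
          | some b => if c < b then some c else best) acc = none) :
    acc = none ∧ t.filterMap (fun row => List.findIdx? isPodS row) = [] := by
  induction t generalizing acc with
  | nil => simpa using h
  | cons row rest ih =>
    rw [List.foldl_cons] at h
    have hrw : firstPodCol row 0 = List.findIdx? isPodS row := by
      rw [firstPodCol_eq_findIdx?]; simp
    cases hfi : List.findIdx? isPodS row with
    | none =>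
      rw [hrw, hfi] at h
      obtain ⟨h1, h2⟩ := ih acc h
      exact ⟨h1, by simp [hfi, h2]⟩
    | some c =>
      rw [hrw, hfi] at h
      exfalso
      cases acc with
      | none => exact absurd (ih (some c) h).1 (by simp)
      | some b =>
        dsimp only [] at h
        by_cases hcb : c < b
        · rw [if_pos hcb] at h; exact absurd (ih (some c) h).1 (by simp)
        · rw [if_neg hcb] at h; exact absurd (ih (some b) h).1 (by simp)

-- ===== VERDICT (by name: the statement is the Claim_ definition above) =====
theorem find_pod_column_py_spec : Claim_equal_find_pod_column_py := by
  intro rows hdr _ hpre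
  obtain ⟨hne, hany⟩ := hpre
  unfold Spec_find_pod_column_py find_pod_column_py find_pod_column_py_alt
  set d := PySem.List.slice rows (some (hdr + 1)) none with hd
  set t := d.take 20 with ht
  simp only [if_neg hne]
  rw [← ht]
  -- a witness pod cell in the first 20 data rows
  obtain ⟨row0, hrow0, hcell⟩ := List.any_eq_true.mp hany
  obtain ⟨c0, hc0mem, hc0⟩ := List.any_eq_true.mp hcell
  obtain ⟨j0, hj0, hc0eq⟩ := List.mem_iff_getElem.mp hc0mem
  have hhit0 : colHit t j0 = true := by
    refine List.any_eq_true.mpr ⟨row0, hrow0, ?_⟩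
    simp only [Bool.and_eq_true, decide_eq_true_eq]
    refine ⟨hj0, ?_⟩
    rw [List.getD_eq_getElem _ _ hj0, hc0eq]
    exact hc0
  -- max_col bounds every row of t
  set maxI := (PySem.List.max? (d.map (fun row => (row.length : Int))) (fun x => x)).getD 0 with hmaxI
  have hbound : ∀ r ∈ t, r.length ≤ maxI.toNat := by
    intro r hr
    have hrd : r ∈ d := List.mem_of_mem_take hr
    cases hM : PySem.List.max? (d.map (fun row => (row.length : Int))) (fun x => x) with
    | none =>
      rw [PySem.List.max?_eq_none_iff] at hM
      simp only [List.map_eq_nil_iff] at hM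
      exact absurd hM hne
    | some M =>
      have := PySem.List.max?_isMax hM ((r.length : Int)) (List.mem_map_of_mem hrd)
      rw [hmaxI, hM]
      simp only [Option.getD_some]
      omega
  -- rewrite A's scan into a Nat-range search for colHit
  have hAfind : (PySem.List.pyRange 0 maxI 1).find? (fun col =>
        t.any (fun row =>
          decide (col < (row.length : Int)) && (normalizePod (PySem.List.pyGetD row col "")).isSome)) =
      ((List.range maxI.toNat).find? (colHit t)).map (fun k => (k : Int)) := by
    have hf : (fun k : Nat => (0:Int) + (k:Int)) = (fun k : Nat => (k:Int)) := by
      funext k; ring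
    rw [PySem.List.pyRange_one, hf, List.find?_map, sub_zero]
    have hpred : ((fun col => t.any (fun row =>
          decide (col < (row.length : Int)) && (normalizePod (PySem.List.pyGetD row col "")).isSome)) ∘
        (fun k : Nat => (k : Int))) = colHit t := by
      funext k
      simp only [Function.comp, PySem.List.pyGetD_natCast, colHit, isPodS, Nat.cast_lt]
    rw [hpred]
    cases List.find? (colHit t) (List.range maxI.toNat) <;> rfl
  -- the range search succeeds
  have hex : ∃ x ∈ List.range maxI.toNat, colHit t x = true :=
    ⟨j0, List.mem_range.mpr (lt_of_lt_of_le hj0 (hbound row0 hrow0)), hhit0⟩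
  obtain ⟨b, hb⟩ := Option.isSome_iff_exists.mp (List.find?_isSome.mpr hex)
  obtain ⟨hPb, hPmin⟩ := find?_range_spec _ _ _ hb
  -- B's fold succeeds and returns the minimum of the per-row first indices
  have hLne : t.filterMap (fun row => List.findIdx? isPodS row) ≠ [] := by
    obtain ⟨i, hi, -⟩ := mem_filterMap_le_of_colHit t j0 hhit0
    exact List.ne_nil_of_mem hi
  cases hfold : t.foldl
      (fun best row =>
        match firstPodCol row 0 with
        | none => best
        | some c =>
          match best with
          | none => some c
          | some b => if c < b then some c else best) none with
  | none => exact absurd (foldB_none t none hfold).2 hLne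
  | some m =>
    obtain ⟨h1, h2, -⟩ := foldB_spec t none m hfold
    have hmL : m ∈ t.filterMap (fun row => List.findIdx? isPodS row) := by
      rcases h1 with h1 | h1
      · exact h1
      · cases h1
    -- b = m
    have hPm : colHit t m = true := colHit_of_mem_filterMap t m hmL
    have hbm : b ≤ m := by
      by_contra hlt
      rw [hPmin m (by omega)] at hPm
      cases hPm
    have hmb : m ≤ b := by
      obtain ⟨i, hiL, hib⟩ := mem_filterMap_le_of_colHit t b hPb
      exact le_trans (h2 i hiL) hib
    have hbmeq : b = m := le_antisymm hbm hmb
    rw [hAfind, hb]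
    simp [hbmeq]
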